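-- pv_equiv track=rewrite | github.com/alexandraback/datacollection | solutions_5670465267826688_1/Python/Strikeskids/dijkstra.py | search
-- ===== SOURCE A (Python) =====
-- def search(arr, v1, v2, inOrder):
--     l1, l2 = None, None
--     for i, a in enumerate(arr):
--         if l1 == None and v1 == a:
--             l1 = i
--         if v2 == a:
--             l2 = i
--     return l1 != None and l2 != None and (not inOrder or l1 < l2)
-- ===== SOURCE B (Python) =====
-- def search(arr, v1, v2, inOrder):
--     if v1 not in arr or v2 not in arr:
--         return False
--     if not inOrder:
--         return True
--     return arr.index(v1) < len(arr) - 1 - arr[::-1].index(v2)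
-- ===== Notes on version B (the rewrite author's own statement) =====
-- stated objective: idiomatic
-- what changed: Replaces the single manual enumerate loop tracking two optional indices with early-return membership tests and library index lookups (first occurrence of v1 via arr.index, last occurrence of v2 via arr[::-1].index on the reversed list).
import Mathlib
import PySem

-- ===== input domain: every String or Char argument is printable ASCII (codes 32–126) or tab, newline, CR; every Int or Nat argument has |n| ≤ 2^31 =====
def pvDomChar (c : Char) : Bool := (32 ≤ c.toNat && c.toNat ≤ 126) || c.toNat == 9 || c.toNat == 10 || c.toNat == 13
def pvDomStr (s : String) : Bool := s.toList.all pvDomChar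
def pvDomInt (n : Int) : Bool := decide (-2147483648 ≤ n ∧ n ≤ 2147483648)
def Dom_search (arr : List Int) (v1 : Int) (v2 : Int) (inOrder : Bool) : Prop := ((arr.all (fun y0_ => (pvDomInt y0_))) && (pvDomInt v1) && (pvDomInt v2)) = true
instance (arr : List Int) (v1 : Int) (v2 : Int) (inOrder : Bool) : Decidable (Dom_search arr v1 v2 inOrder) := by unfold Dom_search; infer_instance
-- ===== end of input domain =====

-- B replaces A's single manual enumerate loop with membership tests and library
-- first/last index lookups (idiomatic decomposition, same O(n) cost).


-- ===== PORT A =====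
-- the loop body: update (l1, l2) at enumerate entry (i, a)
def searchStep (v1 : Int) (v2 : Int) (s : Option Int × Option Int) (p : Int × Int) :
    Option Int × Option Int :=
  ((if s.1 = none ∧ v1 = p.2 then some p.1 else s.1),
   (if v2 = p.2 then some p.1 else s.2))

def search (arr : List Int) (v1 : Int) (v2 : Int) (inOrder : Bool) : Bool :=
  match (PySem.List.enumerate arr 0).foldl (searchStep v1 v2) (none, none) with
  | (some l1, some l2) => !inOrder || decide (l1 < l2)
  | _ => false

-- ===== PORT B =====
def search_alt (arr : List Int) (v1 : Int) (v2 : Int) (inOrder : Bool) : Bool :=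
  if ¬ arr.contains v1 ∨ ¬ arr.contains v2 then false
  else if !inOrder then true
  else
    -- arr[::-1] ported as List.reverse; .index guarded by the membership tests above
    match PySem.List.index? arr v1 with
    | none => false
    | some i =>
      match PySem.List.index? arr.reverse v2 with
      | none => false
      | some j => decide ((i : Int) < (arr.length : Int) - 1 - (j : Int))

-- ===== PRECONDITION & SPEC =====
def Spec_search (arr : List Int) (v1 : Int) (v2 : Int) (inOrder : Bool) (out : Bool) : Prop := out = search_alt arr v1 v2 inOrder
instance (arr : List Int) (v1 : Int) (v2 : Int) (inOrder : Bool) (out : Bool) : Decidable (Spec_search arr v1 v2 inOrder out) := by unfold Spec_search; infer_instance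

-- ===== CLAIM (what is proved, stated in full; the proofs are below) =====
def Claim_equal_search : Prop := ∀ (arr : List Int) (v1 : Int) (v2 : Int) (inOrder : Bool), Dom_search arr v1 v2 inOrder → Spec_search arr v1 v2 inOrder (search arr v1 v2 inOrder)

-- ===== LEMMAS AND PROOFS =====

-- characterisation of A's loop: first occurrence of v1 (kept once found),
-- last occurrence of v2 (located via the first occurrence in the reverse)
theorem searchLoop_spec (v1 v2 : Int) (xs : List Int) (k : Int) (a b : Option Int) :
    (PySem.List.enumerate xs k).foldl (searchStep v1 v2) (a, b) =
      ((match a with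
        | some x => some x
        | none => Option.map (fun n : Nat => k + (n : Int)) (PySem.List.index? xs v1)),
       (match PySem.List.index? xs.reverse v2 with
        | some j => some (k + ((xs.length - 1 - j : Nat) : Int))
        | none => b)) := by
  induction xs generalizing k a b with
  | nil =>
    simp only [PySem.List.enumerate_nil, List.foldl_nil, PySem.List.index?,
      List.idxOf?_nil, Option.map_none, List.reverse_nil]
    cases a <;> rfl
  | cons x xs ih =>
    rw [PySem.List.enumerate_cons, List.foldl_cons]
    have hstep : searchStep v1 v2 (a, b) (k, x) =
        ((if a = none ∧ v1 = x then some k else a), (if v2 = x then some k else b)) := rfl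
    rw [hstep, ih]
    simp only [Prod.mk.injEq]
    refine ⟨?_, ?_⟩
    · -- first component
      cases a with
      | some y => simp
      | none =>
        by_cases h1 : v1 = x
        · subst h1
          rw [if_pos ⟨rfl, rfl⟩, PySem.List.index?_cons_self]
          simp
        · rw [PySem.List.index?_cons_of_ne _ (fun h => h1 h.symm)]
          rw [if_neg (by simp [h1])]
          cases PySem.List.index? xs v1 with
          | none => rfl
          | some n => simp; ring
    · -- second component
      rw [List.reverse_cons]
      by_cases hm : v2 ∈ xs.reverse
      · rw [PySem.List.index?_append_of_mem _ hm]
        obtain ⟨j, hj⟩ := Option.isSome_iff_exists.mp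
          (((PySem.List.index?_isSome_iff _ _).mpr hm))
        rw [hj]
        obtain ⟨hk, -⟩ := PySem.List.getElem_of_index?_eq_some hj
        have hjlt : j < xs.length := by simpa using hk
        simp only [List.length_cons]
        congr 1
        omega
      · have hnone : PySem.List.index? xs.reverse v2 = none :=
          (PySem.List.index?_eq_none_iff _ _).mpr hm
        rw [hnone]
        by_cases h2 : v2 = x
        · subst h2
          rw [PySem.List.index?_append_singleton_self _ _ hm]
          simp
        · have hx : v2 ∉ (xs.reverse ++ [x]) := by
            simp only [List.mem_append, List.mem_singleton]
            rintro (h | h)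
            · exact hm h
            · exact h2 h
          rw [(PySem.List.index?_eq_none_iff _ _).mpr hx, if_neg h2]

theorem search_eq (arr : List Int) (v1 v2 : Int) (inOrder : Bool) :
    search arr v1 v2 inOrder = search_alt arr v1 v2 inOrder := by
  unfold search search_alt
  rw [searchLoop_spec]
  by_cases h1 : v1 ∈ arr
  · by_cases h2 : v2 ∈ arr
    · -- both present
      have h2r : v2 ∈ arr.reverse := by simpa using h2
      obtain ⟨i, hi⟩ := Option.isSome_iff_exists.mp
        ((PySem.List.index?_isSome_iff _ _).mpr h1)
      obtain ⟨j, hj⟩ := Option.isSome_iff_exists.mp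
        ((PySem.List.index?_isSome_iff _ _).mpr h2r)
      obtain ⟨hk, -⟩ := PySem.List.getElem_of_index?_eq_some hj
      have hjlt : j < arr.length := by simpa using hk
      rw [hi, hj, if_neg (by simp [h1, h2])]
      cases inOrder with
      | false => simp
      | true =>
        simp only [Bool.not_true, if_neg (by simp : ¬ (false = true))]
        simp only [Option.map_some, Bool.false_or]
        show decide _ = decide _
        rw [decide_eq_decide]
        omega
    · -- v2 absent: A's l2 stays none; B's membership test fails
      rw [(PySem.List.index?_eq_none_iff _ _).mpr (by simpa using h2 : v2 ∉ arr.reverse)]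
      rw [if_pos (Or.inr (by simpa using h2))]
      cases PySem.List.index? arr v1 <;> rfl
  · -- v1 absent
    rw [(PySem.List.index?_eq_none_iff _ _).mpr h1]
    rw [if_pos (Or.inl (by simpa using h1))]
    cases PySem.List.index? arr.reverse v2 <;> rfl

-- ===== VERDICT (by name: the statement is the Claim_ definition above) =====
theorem search_spec : Claim_equal_search := by
  intro arr v1 v2 inOrder _
  exact search_eq arr v1 v2 inOrder
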